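-- pv_equiv track=rewrite | github.com/eddi7/fits | fits/analyzers/coverage.py | _module_owner_for_directory
-- ===== SOURCE A (Python) =====
-- def _module_owner_for_directory(
--     directory: str, mapping: list[tuple[str, str, str | None]]
-- ) -> tuple[str | None, str | None]:
--     """Return the closest module/owner mapping for a directory."""
--
--     normalized = directory.strip("/").replace("\\", "/")
--     best: tuple[str, str, str | None] | None = None
--
--     for mapped_dir, module, owner in mapping:
--         mapped_normalized = mapped_dir.strip("/")
--         if normalized == mapped_normalized or normalized.startswith(mapped_normalized + "/"):
--             if best is None or len(mapped_normalized) > len(best[0]):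
--                 best = (mapped_normalized, module, owner)
--
--     if best:
--         return best[1], best[2]
--
--     return None, None
-- ===== SOURCE B (Python) =====
-- def _module_owner_for_directory(
--     directory: str, mapping: list[tuple[str, str, str | None]]
-- ) -> tuple[str | None, str | None]:
--     """Collect all matching entries, then return the first one of maximal length."""
--
--     normalized = directory.strip("/").replace("\\", "/")
--
--     matches = [
--         (m, module, owner)
--         for mapped_dir, module, owner in mapping
--         for m in (mapped_dir.strip("/"),)
--         if normalized == m or normalized.startswith(m + "/")
--     ]
--     if not matches:
--         return None, None
--     top = max(len(m) for m, _, _ in matches)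
--     return next((module, owner) for m, module, owner in matches if len(m) == top)
-- ===== Notes on version B (the rewrite author's own statement) =====
-- stated objective: alternative
-- what changed: B replaces A's single-pass best-so-far tracking with a filter-then-select decomposition: build the list of matching (normalized, module, owner) entries, compute the maximal normalized length, and return the first match attaining it.
import Mathlib
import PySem

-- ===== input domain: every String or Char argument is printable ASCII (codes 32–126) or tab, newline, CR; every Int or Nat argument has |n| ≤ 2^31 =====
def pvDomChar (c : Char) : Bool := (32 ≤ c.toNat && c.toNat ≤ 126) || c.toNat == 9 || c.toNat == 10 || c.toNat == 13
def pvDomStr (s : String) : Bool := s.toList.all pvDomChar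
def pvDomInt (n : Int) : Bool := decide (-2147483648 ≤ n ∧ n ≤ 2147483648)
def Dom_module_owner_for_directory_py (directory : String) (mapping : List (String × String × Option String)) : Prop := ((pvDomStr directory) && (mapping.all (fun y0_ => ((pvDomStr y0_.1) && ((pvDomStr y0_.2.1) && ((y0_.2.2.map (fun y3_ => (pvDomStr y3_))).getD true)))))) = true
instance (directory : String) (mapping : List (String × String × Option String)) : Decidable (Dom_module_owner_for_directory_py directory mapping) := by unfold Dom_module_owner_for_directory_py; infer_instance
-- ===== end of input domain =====

-- B differs from A by a filter-then-select decomposition (collect all matches, take the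
-- first of maximal length) instead of A's single-pass best-so-far tracking; same results.

-- ===== PORT A =====
-- Literal transliteration of A: one fold over `mapping` tracking the best match so far
-- (strictly longer normalized prefix wins, ties keep the earlier entry).
def module_owner_for_directory_py (directory : String) (mapping : List (String × String × Option String)) : Option String × Option String :=
  let normalized := PySem.Chars.replace (PySem.Chars.stripChars directory.toList ['/']) ['\\'] ['/']
  let best := mapping.foldl (fun (best : Option (List Char × String × Option String)) t =>
    let mn := PySem.Chars.stripChars t.1.toList ['/']
    if normalized = mn ∨ PySem.Chars.startswith normalized (mn ++ ['/']) = true then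
      match best with
      | none => some (mn, t.2)
      | some b => if mn.length > b.1.length then some (mn, t.2) else best
    else best) none
  match best with
  | some b => (some b.2.1, b.2.2)
  | none => (none, none)

-- ===== PORT B =====
-- Literal transliteration of B (Source B): list comprehension of matches, then max length,
-- then first match of that length. The final `none` branch mirrors the (unreachable)
-- exhaustion of Python's `next` generator over the known-nonempty match list.
def module_owner_for_directory_py_alt (directory : String) (mapping : List (String × String × Option String)) : Option String × Option String :=
  let normalized := PySem.Chars.replace (PySem.Chars.stripChars directory.toList ['/']) ['\\'] ['/']
  let ms := mapping.filterMap (fun t =>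
    let m := PySem.Chars.stripChars t.1.toList ['/']
    if normalized = m ∨ PySem.Chars.startswith normalized (m ++ ['/']) = true then some (m, t.2) else none)
  match ms with
  | [] => (none, none)
  | x :: rest =>
    let top := rest.foldl (fun a y => max a y.1.length) x.1.length
    match (x :: rest).find? (fun y => y.1.length == top) with
    | some y => (some y.2.1, y.2.2)
    | none => (none, none)

-- ===== PRECONDITION & SPEC =====
def Spec_module_owner_for_directory_py (directory : String) (mapping : List (String × String × Option String)) (out : Option String × Option String) : Prop := out = module_owner_for_directory_py_alt directory mapping
instance (directory : String) (mapping : List (String × String × Option String)) (out : Option String × Option String) : Decidable (Spec_module_owner_for_directory_py directory mapping out) := by unfold Spec_module_owner_for_directory_py; infer_instance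

-- ===== CLAIM (what is proved, stated in full; the proofs are below) =====
def Claim_equal_module_owner_for_directory_py : Prop := ∀ (directory : String) (mapping : List (String × String × Option String)), Dom_module_owner_for_directory_py directory mapping → Spec_module_owner_for_directory_py directory mapping (module_owner_for_directory_py directory mapping)

-- ===== LEMMAS AND PROOFS =====

-- A's best-so-far update step, named for the proofs.
def pvUpd (best : Option (List Char × String × Option String)) (x : List Char × String × Option String) : Option (List Char × String × Option String) :=
  match best with
  | none => some x
  | some b => if x.1.length > b.1.length then some x else best

def pvMaxlen (ms : List (List Char × String × Option String)) : Nat :=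
  ms.foldl (fun a y => max a y.1.length) 0

lemma pvFoldl_max_init (ms : List (List Char × String × Option String)) (k : Nat) :
    ms.foldl (fun a y => max a y.1.length) k = max k (pvMaxlen ms) := by
  induction ms generalizing k with
  | nil => simp [pvMaxlen]
  | cons y ms ih =>
    show List.foldl _ (max k y.1.length) ms = _
    rw [ih]
    have h2 : List.foldl (fun a (y : List Char × String × Option String) => max a y.1.length)
        (max 0 y.1.length) ms = max (max 0 y.1.length) (pvMaxlen ms) := ih (max 0 y.1.length)
    have h3 : pvMaxlen (y :: ms) = max (max 0 y.1.length) (pvMaxlen ms) := h2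
    omega

lemma pvMaxlen_cons (y : List Char × String × Option String) (ms : List (List Char × String × Option String)) :
    pvMaxlen (y :: ms) = max y.1.length (pvMaxlen ms) := by
  show List.foldl _ (max 0 y.1.length) ms = _
  rw [pvFoldl_max_init]
  omega

lemma pvLe_maxlen (ms : List (List Char × String × Option String)) :
    ∀ y ∈ ms, y.1.length ≤ pvMaxlen ms := by
  induction ms with
  | nil => intro y hy; cases hy
  | cons z ms ih =>
    intro y hy
    rw [pvMaxlen_cons]
    rcases List.mem_cons.mp hy with h | h
    · subst h; omega
    · have := ih y h; omega

-- A's fold over `mapping` is the best-so-far fold over the filtered match list.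
lemma pvFoldA_eq (normalized : List Char) (mapping : List (String × String × Option String))
    (acc : Option (List Char × String × Option String)) :
    mapping.foldl (fun (best : Option (List Char × String × Option String)) t =>
        if normalized = PySem.Chars.stripChars t.1.toList ['/'] ∨
            PySem.Chars.startswith normalized (PySem.Chars.stripChars t.1.toList ['/'] ++ ['/']) = true then
          match best with
          | none => some (PySem.Chars.stripChars t.1.toList ['/'], t.2)
          | some b => if (PySem.Chars.stripChars t.1.toList ['/']).length > b.1.length then
              some (PySem.Chars.stripChars t.1.toList ['/'], t.2) else best
        else best) acc
    = (mapping.filterMap (fun t =>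
        if normalized = PySem.Chars.stripChars t.1.toList ['/'] ∨
            PySem.Chars.startswith normalized (PySem.Chars.stripChars t.1.toList ['/'] ++ ['/']) = true then
          some (PySem.Chars.stripChars t.1.toList ['/'], t.2) else none)).foldl pvUpd acc := by
  induction mapping generalizing acc with
  | nil => rfl
  | cons t ms ih =>
    simp only [List.foldl_cons, List.filterMap_cons]
    split_ifs with h
    · simp only [List.foldl_cons, ih, pvUpd]
    · exact ih acc

-- The best-so-far fold from a seeded accumulator, characterised by max length.
lemma pvInv (ms : List (List Char × String × Option String)) (b : List Char × String × Option String) :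
    ms.foldl pvUpd (some b) =
      if pvMaxlen ms ≤ b.1.length then some b
      else ms.find? (fun y => decide (pvMaxlen ms ≤ y.1.length)) := by
  induction ms generalizing b with
  | nil => simp [pvMaxlen]
  | cons y ms ih =>
    have hcons := pvMaxlen_cons y ms
    simp only [List.foldl_cons, pvUpd]
    by_cases hy : y.1.length > b.1.length
    · rw [if_pos hy, ih]
      by_cases hM : pvMaxlen ms ≤ y.1.length
      · rw [if_pos hM, if_neg (by omega),
            List.find?_cons_of_pos (by simp; omega)]
      · rw [if_neg hM, if_neg (by omega),
            List.find?_cons_of_neg (by simp; omega)]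
        have heq : pvMaxlen (y :: ms) = pvMaxlen ms := by omega
        rw [heq]
    · rw [if_neg hy, ih]
      by_cases hM : pvMaxlen ms ≤ b.1.length
      · rw [if_pos hM, if_pos (by omega)]
      · rw [if_neg hM, if_neg (by omega),
            List.find?_cons_of_neg (by simp; omega)]
        have heq : pvMaxlen (y :: ms) = pvMaxlen ms := by omega
        rw [heq]

-- On a list whose lengths are all ≤ M, "length = M" and "M ≤ length" find the same element.
lemma pvFind_congr (ms : List (List Char × String × Option String)) (M : Nat)
    (hb : ∀ y ∈ ms, y.1.length ≤ M) :
    ms.find? (fun y => y.1.length == M) = ms.find? (fun y => decide (M ≤ y.1.length)) := by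
  induction ms with
  | nil => rfl
  | cons y ms ih =>
    have hy := hb y (by simp)
    by_cases h : y.1.length = M
    · rw [List.find?_cons_of_pos (by simp [h]), List.find?_cons_of_pos (by simp [h])]
    · rw [List.find?_cons_of_neg (by simp [h]), List.find?_cons_of_neg (by simp; omega)]
      exact ih (fun z hz => hb z (by simp [hz]))

-- The nonempty-case core: best-so-far fold = first element of maximal length.
lemma pvCore (x : List Char × String × Option String) (ms : List (List Char × String × Option String)) :
    ms.foldl pvUpd (some x) =
      (x :: ms).find? (fun y => y.1.length == ms.foldl (fun a y => max a y.1.length) x.1.length) := by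
  rw [pvInv, pvFoldl_max_init]
  by_cases hM : pvMaxlen ms ≤ x.1.length
  · rw [if_pos hM, List.find?_cons_of_pos (by simp; omega)]
  · rw [if_neg hM]
    have hmax : max x.1.length (pvMaxlen ms) = pvMaxlen ms := by omega
    rw [hmax, List.find?_cons_of_neg (by simp; omega)]
    exact (pvFind_congr ms (pvMaxlen ms) (pvLe_maxlen ms)).symm

-- ===== VERDICT (by name: the statement is the Claim_ definition above) =====
theorem module_owner_for_directory_py_spec : Claim_equal_module_owner_for_directory_py := by
  intro directory mapping _
  show module_owner_for_directory_py directory mapping = module_owner_for_directory_py_alt directory mapping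
  simp only [module_owner_for_directory_py, module_owner_for_directory_py_alt]
  rw [pvFoldA_eq]
  cases h : (mapping.filterMap (fun t =>
      if PySem.Chars.replace (PySem.Chars.stripChars directory.toList ['/']) ['\\'] ['/'] = PySem.Chars.stripChars t.1.toList ['/'] ∨
          PySem.Chars.startswith (PySem.Chars.replace (PySem.Chars.stripChars directory.toList ['/']) ['\\'] ['/'])
            (PySem.Chars.stripChars t.1.toList ['/'] ++ ['/']) = true
        then some (PySem.Chars.stripChars t.1.toList ['/'], t.2) else none)) with
  | nil => rfl
  | cons x rest =>
    have hstep : List.foldl pvUpd (pvUpd none x) rest =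
        List.find? (fun y => y.1.length == List.foldl (fun a y => max a y.1.length) x.1.length rest) (x :: rest) := by
      show List.foldl pvUpd (some x) rest = _
      exact pvCore x rest
    rw [List.foldl_cons, hstep]
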